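-- pv_equiv track=rewrite | github.com/Hyungeol94/Software_Competency_Practice | 2025/20250313/소스3.py | get_waiting_time
-- ===== SOURCE A (Python) =====
-- import heapq
--
-- def get_waiting_time(n, times):
--     #n은 스레드 개수
--     #times은 작업 할당 시간
--     myheap = []
--     heapq.heapify(myheap)
--     waiting_time = 0
--     for time in times:
--         start_time, duration = time
--         if len(myheap) < n:
--             heapq.heappush(myheap, start_time+duration)
--         else:
--             curr = heapq.heappop(myheap)
--             if curr <= start_time:
--                 heapq.heappush(myheap, start_time+duration)
--             else:
--                 waiting_time += curr - start_time
--                 heapq.heappush(myheap, curr + duration)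
--     return waiting_time
-- ===== SOURCE B (Python) =====
-- def _argmin(xs):
--     # first index of the minimum and its value, in one scan
--     k, best = 0, xs[0]
--     j = 1
--     for v in xs[1:]:
--         if v < best:
--             k, best = j, v
--         j += 1
--     return k, best
--
--
-- def _step(n, state, job):
--     threads, waiting, i = state
--     s, d = job
--     if i < n:
--         return (threads + [s + d], waiting, i + 1)
--     k, c = _argmin(threads)
--     if c <= s:
--         return (threads[:k] + [s + d] + threads[k + 1:], waiting, i + 1)
--     return (threads[:k] + [c + d] + threads[k + 1:], waiting + (c - s), i + 1)
--
--
-- def get_waiting_time(n, times):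
--     # Fixed pool of per-thread finish times, updated in place at the argmin
--     # index, expressed as a fold with a pure step function (no heap).
--     state = ([], 0, 0)
--     for job in times:
--         state = _step(n, state, job)
--     return state[1]
-- ===== Notes on version B (the rewrite author's own statement) =====
-- stated objective: alternative
-- what changed: The heapq min-heap (push/pop) is replaced by a fixed pool of per-thread finish times updated in place at the first-argmin index, and the job loop is restructured as a fold with a pure step function over (pool, waiting, index).
import Mathlib
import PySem

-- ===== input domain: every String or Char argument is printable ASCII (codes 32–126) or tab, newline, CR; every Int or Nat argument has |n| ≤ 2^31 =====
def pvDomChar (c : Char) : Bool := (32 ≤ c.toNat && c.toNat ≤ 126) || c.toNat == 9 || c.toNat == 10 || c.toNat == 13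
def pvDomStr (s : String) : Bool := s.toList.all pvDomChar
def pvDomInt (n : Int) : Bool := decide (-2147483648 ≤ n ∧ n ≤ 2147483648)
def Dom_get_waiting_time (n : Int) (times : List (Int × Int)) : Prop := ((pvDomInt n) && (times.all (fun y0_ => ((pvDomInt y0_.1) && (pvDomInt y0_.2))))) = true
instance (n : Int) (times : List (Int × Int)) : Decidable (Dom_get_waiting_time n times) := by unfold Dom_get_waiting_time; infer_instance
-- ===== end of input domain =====

-- B replaces A's heapq min-heap with a fixed pool of per-thread finish times,
-- updated in place at the first-argmin index, as a fold with a pure step function.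


-- ===== PORT A =====
-- heapq.heappush / heappop are stdlib calls; they are ported as the corresponding
-- Lean priority-queue operations on a sorted list (orderedInsert / head-pop),
-- which return the same minimum values.
def goA (n : Int) : List (Int × Int) → List Int → Int → Int
  | [], _, w => w
  | (s, d) :: rest, h, w =>
    if (h.length : Int) < n then goA n rest (List.orderedInsert (· ≤ ·) (s + d) h) w
    else
      match h with
      | [] => w  -- Python raises IndexError here (only when n ≤ 0); outside Pre_
      | c :: t =>
        if c ≤ s then goA n rest (List.orderedInsert (· ≤ ·) (s + d) t) w
        else goA n rest (List.orderedInsert (· ≤ ·) (c + d) t) (w + (c - s))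

def get_waiting_time (n : Int) (times : List (Int × Int)) : Int := goA n times [] 0

-- ===== PORT B =====
-- _argmin's scan over xs[1:] with running index j.
def amGo : List Int → Nat → Nat → Int → Nat × Int
  | [], _, k, best => (k, best)
  | v :: t, j, k, best =>
    if v < best then amGo t (j + 1) j v else amGo t (j + 1) k best

-- _argmin: xs[0] raises IndexError on the empty list (none); otherwise scan xs[1:].
def argminB : List Int → Option (Nat × Int)
  | [] => none
  | x :: rest => some (amGo rest 1 0 x)

-- _step; threads[:k] / threads[k+1:] with 0 ≤ k < len are exactly take k / drop (k+1).
def stepB (n : Int) (st : List Int × Int × Int) (job : Int × Int) : List Int × Int × Int :=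
  match st, job with
  | (threads, waiting, i), (s, d) =>
    if i < n then (threads ++ [s + d], waiting, i + 1)
    else
      match argminB threads with
      | none => (threads, waiting, i + 1)  -- Python raises IndexError here (only when n ≤ 0); outside Pre_
      | some (k, c) =>
        if c ≤ s then (threads.take k ++ [s + d] ++ threads.drop (k + 1), waiting, i + 1)
        else (threads.take k ++ [c + d] ++ threads.drop (k + 1), waiting + (c - s), i + 1)

def get_waiting_time_alt (n : Int) (times : List (Int × Int)) : Int :=
  (times.foldl (stepB n) ([], 0, 0)).2.1

-- ===== PRECONDITION & SPEC =====
-- Pre_ excludes n ≤ 0 with a nonempty job list: there both A and B raise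
-- IndexError (A pops from an empty heap, B indexes the empty pool).
def Pre_get_waiting_time (n : Int) (times : List (Int × Int)) : Prop := 0 < n ∨ times = []
instance (n : Int) (times : List (Int × Int)) : Decidable (Pre_get_waiting_time n times) := by unfold Pre_get_waiting_time; infer_instance
def pvWitness_get_waiting_time : Int × (List (Int × Int)) := (2, [(0, 3), (1, 2), (1, 4), (5, 1)])
def Spec_get_waiting_time (n : Int) (times : List (Int × Int)) (out : Int) : Prop := out = get_waiting_time_alt n times
instance (n : Int) (times : List (Int × Int)) (out : Int) : Decidable (Spec_get_waiting_time n times out) := by unfold Spec_get_waiting_time; infer_instance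

-- ===== CLAIM (what is proved, stated in full; the proofs are below) =====
def Claim_equal_get_waiting_time : Prop := ∀ (n : Int) (times : List (Int × Int)), Dom_get_waiting_time n times → Pre_get_waiting_time n times → Spec_get_waiting_time n times (get_waiting_time n times)

-- ===== LEMMAS AND PROOFS =====

-- amGo, started after a scanned prefix `pre` whose first minimum is b at index k,
-- returns an in-range index of pre ++ rest holding its minimum value.
theorem amGo_spec : ∀ (rest pre : List Int) (k : Nat) (b : Int),
    k < pre.length → pre[k]? = some b → (∀ y ∈ pre, b ≤ y) →
    (amGo rest pre.length k b).1 < (pre ++ rest).length ∧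
      (pre ++ rest)[(amGo rest pre.length k b).1]? = some (amGo rest pre.length k b).2 ∧
      ∀ y ∈ pre ++ rest, (amGo rest pre.length k b).2 ≤ y := by
  intro rest
  induction rest with
  | nil => intro pre k b hk hget hmin; simpa [amGo] using ⟨hk, hget, hmin⟩
  | cons v t ih =>
    intro pre k b hk hget hmin
    have hlen : (pre ++ [v]).length = pre.length + 1 := by simp
    by_cases hv : v < b
    · have h1 : pre.length < (pre ++ [v]).length := by simp
      have h2 : (pre ++ [v])[pre.length]? = some v := by
        simp
      have h3 : ∀ y ∈ pre ++ [v], v ≤ y := by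
        intro y hy
        rcases List.mem_append.mp hy with h | h
        · exact le_of_lt (lt_of_lt_of_le hv (hmin y h))
        · simp at h; omega
      have := ih (pre ++ [v]) pre.length v h1 h2 h3
      rw [hlen] at this
      simpa [amGo, hv, List.append_assoc] using this
    · have h1 : k < (pre ++ [v]).length := by simp; omega
      have h2 : (pre ++ [v])[k]? = some b := by
        rw [List.getElem?_append_left hk]; exact hget
      have h3 : ∀ y ∈ pre ++ [v], b ≤ y := by
        intro y hy
        rcases List.mem_append.mp hy with h | h
        · exact hmin y h
        · simp at h; omega
      have := ih (pre ++ [v]) k b h1 h2 h3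
      rw [hlen] at this
      simpa [amGo, hv, List.append_assoc] using this

theorem argminB_spec (x : Int) (rest : List Int) :
    ∃ k c, argminB (x :: rest) = some (k, c) ∧ k < (x :: rest).length ∧
      (x :: rest)[k]? = some c ∧ ∀ y ∈ x :: rest, c ≤ y := by
  have := amGo_spec rest [x] 0 x (by simp) (by simp) (by simp)
  exact ⟨(amGo rest 1 0 x).1, (amGo rest 1 0 x).2, by simp [argminB], by simpa using this⟩

-- splice decomposition at an in-range index
theorem splice_eq (l : List Int) (k : Nat) (c : Int) (hk : k < l.length)
    (hget : l[k]? = some c) : l = l.take k ++ c :: l.drop (k + 1) := by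
  have hc : l[k] = c := by
    have := List.getElem?_eq_getElem hk
    rw [this] at hget; exact Option.some.inj hget
  conv_lhs => rw [← List.take_append_drop k l, ← List.getElem_cons_drop hk, hc]

theorem goA_eq_foldl (n : Int) (hn : 0 < n) :
    ∀ (ts : List (Int × Int)) (h threads : List Int) (w : Int) (i : Nat),
      List.Pairwise (· ≤ ·) h → h.Perm threads → h.length = min i n.toNat →
      goA n ts h w = (ts.foldl (stepB n) (threads, w, (i : Int))).2.1 := by
  intro ts
  induction ts with
  | nil => intro h threads w i _ _ _; rfl
  | cons td rest ih =>
    obtain ⟨s, d⟩ := td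
    intro h threads w i hs hp hl
    have hnn : (n.toNat : Int) = n := Int.toNat_of_nonneg (le_of_lt hn)
    have hcond : ((h.length : Int) < n) ↔ ((i : Int) < n) := by
      constructor <;> intro hx <;> omega
    have hcast : ((i : Int) + 1) = ((i + 1 : Nat) : Int) := by push_cast; ring
    by_cases hlt : (i : Int) < n
    · simp only [goA, List.foldl_cons, stepB]
      rw [if_pos (hcond.mpr hlt), if_pos hlt, hcast]
      exact ih _ _ w (i + 1) (List.Pairwise.orderedInsert _ _ hs)
        ((List.perm_orderedInsert _ _ _).trans
          ((hp.cons _).trans (List.perm_append_singleton _ _).symm))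
        (by simp [List.orderedInsert_length]; omega)
    · have hhlen : h.length = n.toNat := by omega
      cases h with
      | nil => exfalso; simp at hhlen; omega
      | cons c t =>
        cases threads with
        | nil => exfalso; have := hp.length_eq; simp at this
        | cons x trest =>
          obtain ⟨k, c', hargeq, hk, hget, hmin⟩ := argminB_spec x trest
          simp only [goA, List.foldl_cons, stepB, hargeq]
          rw [if_neg (fun hx => hlt (hcond.mp hx)), if_neg hlt]
          have hcmem : c ∈ x :: trest := hp.mem_iff.mp (List.mem_cons_self ..)
          have hc'mem : c' ∈ c :: t := hp.mem_iff.mpr (List.mem_of_getElem? hget)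
          have hcc : c' = c := by
            have h1 : c' ≤ c := hmin c hcmem
            have h2 : c ≤ c' := by
              rcases List.mem_cons.mp hc'mem with h | h
              · omega
              · exact List.rel_of_pairwise_cons hs h
            omega
          subst hcc
          have heq := splice_eq (x :: trest) k c' hk hget
          have hp2 : (c' :: t).Perm
              ((x :: trest).take k ++ c' :: (x :: trest).drop (k + 1)) := by
            rw [← heq]; exact hp
          have htperm : t.Perm ((x :: trest).take k ++ (x :: trest).drop (k + 1)) :=
            (List.perm_cons c').mp (hp2.trans List.perm_middle)
          have hnewperm : ∀ z : Int,
              (List.orderedInsert (· ≤ ·) z t).Perm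
                ((x :: trest).take k ++ [z] ++ (x :: trest).drop (k + 1)) := by
            intro z
            have := (List.perm_orderedInsert (· ≤ ·) z t).trans
              ((htperm.cons z).trans List.perm_middle.symm)
            simpa [List.append_assoc] using this
          have hhlen' : t.length + 1 = n.toNat := by simpa using hhlen
          have hnewlen : ∀ z : Int,
              (List.orderedInsert (· ≤ ·) z t).length = min (i + 1) n.toNat := by
            intro z
            simp only [List.orderedInsert_length]
            omega
          have hsorted : ∀ z : Int, List.Pairwise (· ≤ ·) (List.orderedInsert (· ≤ ·) z t) :=
            fun z => List.Pairwise.orderedInsert _ _ hs.of_cons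
          by_cases hcs : c' ≤ s
          · rw [if_pos hcs, if_pos hcs, hcast]
            exact ih _ _ w (i + 1) (hsorted _) (hnewperm _) (hnewlen _)
          · rw [if_neg hcs, if_neg hcs, hcast]
            exact ih _ _ (w + (c' - s)) (i + 1) (hsorted _) (hnewperm _) (hnewlen _)

-- ===== VERDICT (by name: the statement is the Claim_ definition above) =====
theorem get_waiting_time_spec : Claim_equal_get_waiting_time := by
  intro n times _ hpre
  unfold Spec_get_waiting_time get_waiting_time get_waiting_time_alt
  rcases hpre with hn | hnil
  · exact goA_eq_foldl n hn times [] [] 0 0 (by simp) (List.Perm.refl _) (by simp)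
  · subst hnil; rfl
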